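-- pv_equiv track=rewrite | github.com/Ananthurp/hybrid_sft | evaluation/multi_openllm/evaluation_gsm8k_voting.py | majority_and_bestof
-- ===== SOURCE A (Python) =====
-- from typing import List, Tuple
--
-- def majority_and_bestof(reference, candidates: List, depths=(1,4,8,16,32)) -> Tuple[List[int], List[int]]:
--     from collections import Counter
--     maj, best = [], []
--     for d in depths:
--         d = min(d, len(candidates))
--         cur = candidates[:d]
--         # majority vote
--         most_common = Counter(cur).most_common(1)[0][0] if len(cur) else None
--         maj.append(int(most_common == reference))
--         # best-of-n (any correct)
--         best.append(int(reference in cur))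
--     return maj, best
-- ===== SOURCE B (Python) =====
-- def majority_and_bestof(reference, candidates, depths=(1,4,8,16,32)):
--     # One left-to-right pass with a running Counter; each depth d is answered by
--     # a table lookup at the length of its prefix candidates[:d].
--     from collections import Counter
--     lengths = [len(candidates[:d]) for d in depths]
--     checkpoints = set(lengths)
--     counts = Counter()
--     seen = False
--     table = {}
--
--     def record(k):
--         if counts:
--             maj = int(counts.most_common(1)[0][0] == reference)
--         else:
--             maj = 0
--         table[k] = (maj, int(seen))
--
--     if 0 in checkpoints:
--         record(0)
--     for i, x in enumerate(candidates, 1):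
--         counts[x] += 1
--         seen = seen or x == reference
--         if i in checkpoints:
--             record(i)
--
--     return [table[k][0] for k in lengths], [table[k][1] for k in lengths]
-- ===== Notes on version B (the rewrite author's own statement) =====
-- stated objective: alternative
-- what changed: B replaces A's per-depth recount (rebuilding a Counter over each prefix) with a single left-to-right pass that maintains one running Counter and a running 'reference seen' flag, recording the flags once per distinct prefix length len(candidates[:d]) and answering each depth by table lookup.
import Mathlib
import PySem

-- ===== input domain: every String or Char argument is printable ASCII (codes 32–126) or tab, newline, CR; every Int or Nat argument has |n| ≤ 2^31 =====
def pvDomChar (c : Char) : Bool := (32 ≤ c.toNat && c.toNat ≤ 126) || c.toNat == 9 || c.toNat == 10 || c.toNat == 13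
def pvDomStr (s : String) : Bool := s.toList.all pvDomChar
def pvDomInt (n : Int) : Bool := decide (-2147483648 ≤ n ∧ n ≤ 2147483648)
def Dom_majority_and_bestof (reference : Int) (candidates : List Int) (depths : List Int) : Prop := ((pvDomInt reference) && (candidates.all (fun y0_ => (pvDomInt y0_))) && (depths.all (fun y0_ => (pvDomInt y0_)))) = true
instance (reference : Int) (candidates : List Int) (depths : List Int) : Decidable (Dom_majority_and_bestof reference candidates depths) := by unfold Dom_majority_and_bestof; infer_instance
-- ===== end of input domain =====

-- B replaces A's per-depth prefix recount by one running pass with a checkpoint table (objective: alternative decomposition).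

-- ===== PORT A =====
-- Counter(cur).most_common(1)[0] : the FIRST item (dict insertion order) with maximal count;
-- exact for CPython (heapq.nlargest is stable, ties keep first-encounter order).
def pvMostCommon1 (items : List (Int × Int)) : Option (Int × Int) :=
  match items with
  | [] => none
  | p :: rest => some (rest.foldl (fun best q => if q.2 > best.2 then q else best) p)

def majority_and_bestof (reference : Int) (candidates : List Int) (depths : List Int) : List Int × List Int :=
  depths.foldl (fun (acc : List Int × List Int) d =>
    let d2 : Int := min d (candidates.length : Int)
    let cur := PySem.List.slice candidates none (some d2)
    let mostCommon : Option Int :=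
      if cur.length ≠ 0 then (pvMostCommon1 (PySem.Dict.counter cur).items).map Prod.fst else none
    let majv : Int :=
      match mostCommon with
      | some m => if m == reference then 1 else 0
      | none => 0            -- int(None == reference) = 0 (reference is an int)
    (acc.1 ++ [majv], acc.2 ++ [if reference ∈ cur then 1 else 0])) ([], [])

-- ===== PORT B =====
-- len(candidates[:d]) : the checkpoint (table key) of depth d
def pvEff (cs : List Int) (d : Int) : Int :=
  ((PySem.List.slice cs none (some d)).length : Int)

-- B's record(): most_common(1) of the running counter + the running seen flag
def pvFlags (reference : Int) (counts : PySem.Dict Int Int) (seen : Bool) : Int × Int :=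
  let maj : Int :=
    match (pvMostCommon1 counts.items).map Prod.fst with
    | some top => if top == reference then 1 else 0
    | none => 0
  (maj, if seen then 1 else 0)

def majority_and_bestof_alt (reference : Int) (candidates : List Int) (depths : List Int) : List Int × List Int :=
  let lengths := depths.map (pvEff candidates)
  let cps : PySem.Set Int := PySem.Set.ofList lengths
  let table0 : PySem.Dict Int (Int × Int) :=
    if cps.contains 0 then (PySem.Dict.empty).insert 0 (pvFlags reference PySem.Dict.empty false)
    else PySem.Dict.empty
  let st := candidates.foldl
    (fun (st : Int × PySem.Dict Int Int × Bool × PySem.Dict Int (Int × Int)) x =>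
      let i := st.1 + 1
      let counts := st.2.1.modify x 0 (· + 1)          -- counts[x] += 1
      let seen := st.2.2.1 || (x == reference)
      let table :=
        if cps.contains i then st.2.2.2.insert i (pvFlags reference counts seen) else st.2.2.2
      (i, counts, seen, table))
    ((0 : Int), PySem.Dict.empty, false, table0)
  let table := st.2.2.2
  -- table[k] never misses in Python (every prefix length is a recorded checkpoint); the getD default is unreachable
  (lengths.map (fun k => (table.getD k (0, 0)).1),
   lengths.map (fun k => (table.getD k (0, 0)).2))

-- ===== PRECONDITION & SPEC =====
def Spec_majority_and_bestof (reference : Int) (candidates : List Int) (depths : List Int) (out : List Int × List Int) : Prop := out = majority_and_bestof_alt reference candidates depths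
instance (reference : Int) (candidates : List Int) (depths : List Int) (out : List Int × List Int) : Decidable (Spec_majority_and_bestof reference candidates depths out) := by unfold Spec_majority_and_bestof; infer_instance

-- ===== CLAIM (what is proved, stated in full; the proofs are below) =====
def Claim_equal_majority_and_bestof : Prop := ∀ (reference : Int) (candidates : List Int) (depths : List Int), Dom_majority_and_bestof reference candidates depths → Spec_majority_and_bestof reference candidates depths (majority_and_bestof reference candidates depths)

-- ===== LEMMAS AND PROOFS =====

-- a slice with only an upper bound is the take of the clamped bound
lemma slice_none_some (cs : List Int) (e : Int) :
    PySem.List.slice cs none (some e) = cs.take (PySem.List.clampIdx cs.length e) := by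
  simp [PySem.List.slice]

lemma clampIdx_le' (n : Nat) (k : Int) : PySem.List.clampIdx n k ≤ n := by
  unfold PySem.List.clampIdx; split_ifs <;> omega

lemma pvEff_eq (cs : List Int) (d : Int) :
    pvEff cs d = ((PySem.List.clampIdx cs.length d : Nat) : Int) := by
  unfold pvEff
  rw [slice_none_some, List.length_take]
  have := clampIdx_le' cs.length d
  omega

-- A's bound min d n clamps to the same prefix length as d itself
lemma clampIdx_min_self (n : Nat) (d : Int) :
    PySem.List.clampIdx n (min d (n : Int)) = PySem.List.clampIdx n d := by
  unfold PySem.List.clampIdx; split_ifs <;> omega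

-- A's per-depth values, named for the induction over depths
def pvMajA (r : Int) (cs : List Int) (d : Int) : Int :=
  let cur := PySem.List.slice cs none (some (min d (cs.length : Int)))
  let mostCommon : Option Int :=
    if cur.length ≠ 0 then (pvMostCommon1 (PySem.Dict.counter cur).items).map Prod.fst else none
  match mostCommon with
  | some m => if m == r then 1 else 0
  | none => 0

def pvBestA (r : Int) (cs : List Int) (d : Int) : Int :=
  if r ∈ PySem.List.slice cs none (some (min d (cs.length : Int))) then 1 else 0

lemma A_fold (r : Int) (cs : List Int) (ds : List Int) (acc : List Int × List Int) :
    ds.foldl (fun (acc : List Int × List Int) d =>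
      let d2 : Int := min d (cs.length : Int)
      let cur := PySem.List.slice cs none (some d2)
      let mostCommon : Option Int :=
        if cur.length ≠ 0 then (pvMostCommon1 (PySem.Dict.counter cur).items).map Prod.fst else none
      let majv : Int :=
        match mostCommon with
        | some m => if m == r then 1 else 0
        | none => 0
      (acc.1 ++ [majv], acc.2 ++ [if r ∈ cur then 1 else 0])) acc
    = (acc.1 ++ ds.map (pvMajA r cs), acc.2 ++ ds.map (pvBestA r cs)) := by
  induction ds generalizing acc with
  | nil => simp
  | cons d t ih =>
    rw [List.foldl_cons, ih]
    simp [pvMajA, pvBestA]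

-- the whole-loop invariant: after folding cs, the state is
-- (|cs|, Counter(cs), seen(cs), a table answering every recorded checkpoint ≤ |cs|)
lemma loop_char (r : Int) (cps : PySem.Set Int) (cs : List Int) :
    ∃ table,
      cs.foldl
        (fun (st : Int × PySem.Dict Int Int × Bool × PySem.Dict Int (Int × Int)) x =>
          let i := st.1 + 1
          let counts := st.2.1.modify x 0 (· + 1)
          let seen := st.2.2.1 || (x == r)
          let table := if cps.contains i then st.2.2.2.insert i (pvFlags r counts seen) else st.2.2.2
          (i, counts, seen, table))
        ((0 : Int), PySem.Dict.empty, false,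
          (if cps.contains 0 then (PySem.Dict.empty).insert 0 (pvFlags r PySem.Dict.empty false)
           else PySem.Dict.empty))
      = ((cs.length : Int), PySem.Dict.counter cs, decide (r ∈ cs), table)
      ∧ ∀ e : Nat, e ≤ cs.length → cps.contains (e : Int) = true →
          table.getD (e : Int) (0, 0)
            = pvFlags r (PySem.Dict.counter (cs.take e)) (decide (r ∈ cs.take e)) := by
  induction cs using List.reverseRecOn with
  | nil =>
    refine ⟨_, rfl, ?_⟩
    intro e he hc
    simp only [List.length_nil, Nat.le_zero] at he
    subst he
    simp only [Nat.cast_zero] at hc ⊢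
    rw [hc, if_pos rfl, PySem.Dict.getD_insert_self]
    simp [PySem.Dict.counter]
  | append_singleton ys x ih =>
    obtain ⟨ty, hfold, hlook⟩ := ih
    rw [List.foldl_append, hfold]
    refine ⟨if cps.contains ((ys.length : Int) + 1) then
        ty.insert ((ys.length : Int) + 1)
          (pvFlags r ((PySem.Dict.counter ys).modify x 0 (· + 1))
            (decide (r ∈ ys) || (x == r)))
      else ty, ?_, ?_⟩
    · dsimp only
      have h2 : (PySem.Dict.counter ys).modify x 0 (· + 1) = PySem.Dict.counter (ys ++ [x]) :=
        (PySem.Dict.counter_append_singleton ys x).symm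
      have h3 : (decide (r ∈ ys) || (x == r)) = decide (r ∈ ys ++ [x]) := by
        by_cases h : x = r <;> simp [h, List.mem_append, Ne.symm]
      exact congrArg₂ Prod.mk (by push_cast [List.length_append, List.length_singleton]; omega)
        (congrArg₂ Prod.mk h2 (congrArg₂ Prod.mk h3 (by rw [h2, h3])))
    · intro e he hc
      by_cases hE : e = ys.length + 1
      · have hke : ((e : Nat) : Int) = (ys.length : Int) + 1 := by rw [hE]; push_cast; ring
        rw [hke] at hc
        rw [hke, if_pos hc, PySem.Dict.getD_insert_self]
        have htake : (ys ++ [x]).take e = ys ++ [x] := by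
          apply List.take_of_length_le; simp [hE]
        rw [htake, ← PySem.Dict.counter_append_singleton]
        congr 1
        by_cases h : x = r <;> simp [h, List.mem_append, Ne.symm]
      · have he' : e ≤ ys.length := by simp at he; omega
        have htake : (ys ++ [x]).take e = ys.take e := List.take_append_of_le_length he'
        rw [htake]
        have hne : ((e : Nat) : Int) ≠ (ys.length : Int) + 1 := by omega
        by_cases hci : cps.contains ((ys.length : Int) + 1) = true
        · rw [if_pos hci, PySem.Dict.getD_insert_of_ne ty _ _ hne]
          exact hlook e he' hc
        · rw [if_neg hci]
          exact hlook e he' hc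

-- B's answer at depth d: the recorded flags of the clamped prefix
def pvFlagsAt (r : Int) (cs : List Int) (d : Int) : Int × Int :=
  pvFlags r (PySem.Dict.counter (cs.take (PySem.List.clampIdx cs.length d)))
    (decide (r ∈ cs.take (PySem.List.clampIdx cs.length d)))

lemma B_char (r : Int) (cs : List Int) (ds : List Int) :
    majority_and_bestof_alt r cs ds
      = (ds.map (fun d => (pvFlagsAt r cs d).1), ds.map (fun d => (pvFlagsAt r cs d).2)) := by
  unfold majority_and_bestof_alt
  dsimp only
  obtain ⟨table, hfold, hlook⟩ := loop_char r (PySem.Set.ofList (ds.map (pvEff cs))) cs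
  rw [hfold]
  dsimp only
  rw [List.map_map, List.map_map]
  have key : ∀ d ∈ ds,
      table.getD (pvEff cs d) (0, 0) = pvFlagsAt r cs d := by
    intro d hd
    have hmem : pvEff cs d ∈ PySem.Set.ofList (ds.map (pvEff cs)) :=
      (PySem.Set.mem_ofList _ _).mpr (List.mem_map_of_mem hd)
    have hc : (PySem.Set.ofList (ds.map (pvEff cs))).contains
        ((PySem.List.clampIdx cs.length d : Nat) : Int) = true := by
      rw [← pvEff_eq]
      exact (PySem.Set.contains_iff _ _).mpr hmem
    have := hlook (PySem.List.clampIdx cs.length d) (clampIdx_le' _ _) hc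
    rw [← pvEff_eq] at this
    exact this
  exact congrArg₂ Prod.mk (List.map_congr_left fun d hd => by simp [key d hd])
    (List.map_congr_left fun d hd => by simp [key d hd])

-- A's per-depth slice is B's clamped prefix, and the two majority and seen
-- computations over it are the same expression
lemma maj_eq (r : Int) (cs : List Int) (d : Int) :
    pvMajA r cs d = (pvFlagsAt r cs d).1 := by
  unfold pvMajA pvFlagsAt
  rw [slice_none_some, clampIdx_min_self]
  rcases hcur : cs.take (PySem.List.clampIdx cs.length d) with _ | ⟨a, t⟩
  · simp [pvFlags, PySem.Dict.counter, PySem.Dict.empty, pvMostCommon1]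
  · simp [pvFlags]

lemma best_eq (r : Int) (cs : List Int) (d : Int) :
    pvBestA r cs d = (pvFlagsAt r cs d).2 := by
  unfold pvBestA pvFlagsAt
  rw [slice_none_some, clampIdx_min_self]
  by_cases hm : r ∈ cs.take (PySem.List.clampIdx cs.length d) <;> simp [hm, pvFlags]

-- ===== VERDICT (by name: the statement is the Claim_ definition above) =====
theorem majority_and_bestof_spec : Claim_equal_majority_and_bestof := by
  intro r cs ds _
  unfold Spec_majority_and_bestof majority_and_bestof
  rw [A_fold r cs ds ([], []), B_char]
  simp only [List.nil_append]
  exact congrArg₂ Prod.mk (List.map_congr_left fun d _ => maj_eq r cs d)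
    (List.map_congr_left fun d _ => best_eq r cs d)
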